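-- pv_equiv track=rewrite | github.com/CasapeStock/MonteCarlo | run.py | group_and_limit_profiles
-- ===== SOURCE A (Python) =====
-- def group_and_limit_profiles(profiles, max_profiles=500):
--     """
--     Group profiles by series and limit total number of profiles
--     Prioritizes most common profile series
--     """
--     # Define priority order for profile series
--     priority_series = ['HEA', 'HEB', 'HEM', 'IPE', 'B', 'UNP']
--
--     # Group profiles by series
--     profile_groups = {}
--     for profile in profiles:
--         # Extract series prefix
--         series = ''.join([char for char in profile if char.isalpha()])
--
--         if series not in profile_groups:
--             profile_groups[series] = []
--         profile_groups[series].append(profile)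
--
--     # Sort groups by priority and size
--     sorted_groups = sorted(
--         profile_groups.items(),
--         key=lambda x: (
--             priority_series.index(x[0]) if x[0] in priority_series else len(priority_series),
--             -len(x[1])
--         )
--     )
--
--     # Collect profiles, respecting max limit
--     selected_profiles = []
--     for series, group_profiles in sorted_groups:
--         # Sort profiles within group
--         group_profiles.sort()
--
--         # Add profiles from this group
--         for profile in group_profiles:
--             if len(selected_profiles) < max_profiles:
--                 selected_profiles.append(profile)
--             else:
--                 break
--
--         if len(selected_profiles) >= max_profiles:
--             break
--
--     return selected_profiles
-- ===== SOURCE B (Python) =====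
-- def group_and_limit_profiles(profiles, max_profiles=500):
--     """
--     Group profiles by series and limit total number of profiles
--     Prioritizes most common profile series
--     """
--     priority_series = ['HEA', 'HEB', 'HEM', 'IPE', 'B', 'UNP']
--
--     # Group profiles by series (only to determine the group order)
--     groups = {}
--     for profile in profiles:
--         series = ''.join([char for char in profile if char.isalpha()])
--         groups.setdefault(series, []).append(profile)
--
--     # Rank of each series = its position in the priority/size-sorted group order
--     order = sorted(
--         groups.items(),
--         key=lambda x: (
--             priority_series.index(x[0]) if x[0] in priority_series else len(priority_series),
--             -len(x[1])
--         )
--     )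
--     rank = {series: i for i, (series, _) in enumerate(order)}
--
--     # One flat stable sort of all profiles by (group rank, profile), then a slice
--     flat = sorted(
--         profiles,
--         key=lambda p: (rank[''.join([char for char in p if char.isalpha()])], p)
--     )
--     return flat[:max(max_profiles, 0)]
-- ===== Notes on version B (the rewrite author's own statement) =====
-- stated objective: alternative
-- what changed: Instead of sorting each group separately and collecting profiles in a bounded loop with breaks, B computes each series' rank in the sorted group order and performs one flat stable sort of all profiles by (rank, profile), returning a single clamped slice.
import Mathlib
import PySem

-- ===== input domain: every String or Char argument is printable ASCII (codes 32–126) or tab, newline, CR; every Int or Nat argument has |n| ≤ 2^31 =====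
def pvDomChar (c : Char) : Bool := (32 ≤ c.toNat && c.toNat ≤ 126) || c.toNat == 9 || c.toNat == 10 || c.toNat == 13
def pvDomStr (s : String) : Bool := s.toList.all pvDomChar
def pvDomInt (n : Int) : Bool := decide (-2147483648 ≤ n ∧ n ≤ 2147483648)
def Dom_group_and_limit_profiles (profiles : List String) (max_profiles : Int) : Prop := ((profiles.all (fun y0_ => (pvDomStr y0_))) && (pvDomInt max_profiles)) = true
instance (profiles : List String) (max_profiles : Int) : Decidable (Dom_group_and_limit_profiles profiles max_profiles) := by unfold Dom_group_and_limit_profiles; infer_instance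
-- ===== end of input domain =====

-- B replaces A's per-group sorting and bounded collection loop by one flat stable sort of
-- all profiles keyed by (group rank, profile) followed by a clamped slice (objective: alternative).

-- ===== PORT A =====

-- ''.join([char for char in profile if char.isalpha()]) : joining the kept characters with
-- the empty separator is exactly the string of the filtered character list
def pvSeries (p : String) : String :=
  String.ofList (p.toList.filter (fun c => PySem.Chars.isalpha c))

def pvPriority : List String := ["HEA", "HEB", "HEM", "IPE", "B", "UNP"]

-- priority_series.index(x[0]) if x[0] in priority_series else len(priority_series)
def pvPrioKey (s : String) : Int :=
  match PySem.List.index? pvPriority s with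
  | some i => (i : Int)
  | none => PySem.List.len pvPriority

-- the grouping loop; profile_groups[series].append(profile) runs with the key present
-- (the guard just inserted it), so Dict.modify with default [] is exact
def pvGroupsA (profiles : List String) : PySem.Dict String (List String) :=
  profiles.foldl (fun d p =>
    let s := pvSeries p
    let d' := if d.contains s then d else d.insert s []
    d'.modify s [] (fun g => g ++ [p])) PySem.Dict.empty

-- sorted(profile_groups.items(), key=lambda x: (priority…, -len(x[1])))
def pvSortGroups (d : PySem.Dict String (List String)) : List (String × List String) :=
  PySem.List.sorted2 d.items (fun x => pvPrioKey x.1) (fun x => -(PySem.List.len x.2))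

-- the inner 'for profile in group_profiles: if len < max: append else break'
def pvAddA (m : Int) : List String → List String → List String
  | [], sel => sel
  | p :: ps, sel => if PySem.List.len sel < m then pvAddA m ps (sel ++ [p]) else sel

-- the outer loop over sorted_groups with its 'if len >= max: break'
def pvCollectA (m : Int) : List (String × List String) → List String → List String
  | [], sel => sel
  | sg :: rest, sel =>
      let g' := PySem.List.sorted sg.2 (fun x => x)
      let sel' := pvAddA m g' sel
      if m ≤ PySem.List.len sel' then sel' else pvCollectA m rest sel'

def group_and_limit_profiles (profiles : List String) (max_profiles : Int) : List String :=
  pvCollectA max_profiles (pvSortGroups (pvGroupsA profiles)) []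

-- ===== PORT B =====

-- groups.setdefault(s, []).append(p) : append to the existing list, or start the key at [p]
def pvGroupsB (profiles : List String) : PySem.Dict String (List String) :=
  profiles.foldl (fun d p => d.modify (pvSeries p) [] (fun g => g ++ [p])) PySem.Dict.empty

-- rank = {series: i for i, (series, _) in enumerate(order)}
def pvRank (order : List (String × List String)) : PySem.Dict String Int :=
  (PySem.List.enumerate order).foldl (fun d x => d.insert x.2.1 x.1) PySem.Dict.empty

def group_and_limit_profiles_alt (profiles : List String) (max_profiles : Int) : List String :=
  let order := pvSortGroups (pvGroupsB profiles)
  let rank := pvRank order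
  -- rank[…] in Source B never misses (every series of a profile is a key of order), so getD is exact
  let flat := PySem.List.sorted2 profiles (fun p => rank.getD (pvSeries p) 0) (fun p => p)
  PySem.List.slice flat none (some (max max_profiles 0))

-- ===== PRECONDITION & SPEC =====
def Spec_group_and_limit_profiles (profiles : List String) (max_profiles : Int) (out : List String) : Prop := out = group_and_limit_profiles_alt profiles max_profiles
instance (profiles : List String) (max_profiles : Int) (out : List String) : Decidable (Spec_group_and_limit_profiles profiles max_profiles out) := by unfold Spec_group_and_limit_profiles; infer_instance

-- ===== CLAIM (what is proved, stated in full; the proofs are below) =====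
def Claim_equal_group_and_limit_profiles : Prop := ∀ (profiles : List String) (max_profiles : Int), Dom_group_and_limit_profiles profiles max_profiles → Spec_group_and_limit_profiles profiles max_profiles (group_and_limit_profiles profiles max_profiles)

-- ===== LEMMAS AND PROOFS =====

lemma pv_groupsA_eq_groupsB (profiles : List String) : pvGroupsA profiles = pvGroupsB profiles := by
  unfold pvGroupsA pvGroupsB
  congr 1
  funext d p
  by_cases h : d.contains (pvSeries p)
  · simp [h]
  · have hf : d.contains (pvSeries p) = false := by simpa using h
    simp only [PySem.Dict.modify, hf, Bool.false_eq_true, if_false,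
      PySem.Dict.getD_insert_self, PySem.Dict.insert_insert_self,
      PySem.Dict.getD_of_not_contains d _ hf]

lemma pv_getD_groupsB (profiles : List String) (s : String) :
    (pvGroupsB profiles).getD s [] = profiles.filter (fun p => pvSeries p == s) := by
  have h : pvGroupsB profiles =
      (profiles.map (fun p => (pvSeries p, p))).foldl
        (fun d q => d.modify q.1 [] (fun g => g ++ [q.2])) PySem.Dict.empty := by
    unfold pvGroupsB; rw [List.foldl_map]
  rw [h, PySem.Dict.getD_foldl_modify_append, List.filter_map, List.map_map]
  simp [Function.comp_def]

lemma pv_keys_groupsB (profiles : List String) :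
    (pvGroupsB profiles).keys = PySem.Set.ofList (profiles.map pvSeries) := by
  unfold pvGroupsB
  rw [PySem.Dict.keys_foldl_modify_key profiles pvSeries [] (fun _ p => (fun g => g ++ [p]))]
  simp [PySem.Set.ofList, PySem.Set.update]

lemma pv_nodup_keys_groupsB (profiles : List String) : (pvGroupsB profiles).keys.Nodup := by
  unfold pvGroupsB
  exact PySem.Dict.nodup_keys_foldl_modify_key profiles pvSeries [] (fun _ p => (fun g => g ++ [p]))
    _ (by simp)

lemma pv_items_groupsB (profiles : List String) :
    (pvGroupsB profiles).items =
      (PySem.Set.ofList (profiles.map pvSeries)).map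
        (fun s => (s, profiles.filter (fun p => pvSeries p == s))) := by
  rw [PySem.Dict.items_eq_map_keys _ (pv_nodup_keys_groupsB profiles) [], pv_keys_groupsB]
  exact List.map_congr_left (fun s _ => by rw [pv_getD_groupsB])

lemma pv_getD_foldl_insert_not_mem {κ ν : Type} [BEq κ] [LawfulBEq κ]
    (ps : List (κ × ν)) (d : PySem.Dict κ ν) (k : κ) (d0 : ν)
    (h : k ∉ ps.map Prod.fst) :
    (ps.foldl (fun d x => d.insert x.1 x.2) d).getD k d0 = d.getD k d0 := by
  induction ps generalizing d with
  | nil => rfl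
  | cons q qs ih =>
      simp only [List.map_cons, List.mem_cons, not_or] at h
      simp only [List.foldl_cons]
      rw [ih _ h.2, PySem.Dict.getD_insert_of_ne d q.2 d0 h.1]

lemma pv_getD_foldl_insert_mem {κ ν : Type} [BEq κ] [LawfulBEq κ]
    (ps : List (κ × ν)) (d : PySem.Dict κ ν) (k : κ) (v : ν) (d0 : ν)
    (hn : (ps.map Prod.fst).Nodup) (hmem : (k, v) ∈ ps) :
    (ps.foldl (fun d x => d.insert x.1 x.2) d).getD k d0 = v := by
  induction ps generalizing d with
  | nil => cases hmem
  | cons q qs ih =>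
      simp only [List.map_cons, List.nodup_cons] at hn
      rcases List.mem_cons.mp hmem with h | h
      · subst h
        simp only [List.foldl_cons]
        rw [pv_getD_foldl_insert_not_mem qs _ k d0 hn.1, PySem.Dict.getD_insert_self]
      · exact ih _ hn.2 h

lemma pv_rank_getD (order : List (String × List String))
    (hn : (order.map Prod.fst).Nodup) (j : Nat) (hj : j < order.length) :
    (pvRank order).getD (order[j].1) 0 = (j : Int) := by
  have h : pvRank order =
      ((PySem.List.enumerate order).map (fun x => (x.2.1, x.1))).foldl
        (fun d q => d.insert q.1 q.2) PySem.Dict.empty := by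
    unfold pvRank; rw [List.foldl_map]
  rw [h]
  apply pv_getD_foldl_insert_mem
  · have : ((PySem.List.enumerate order).map (fun x => (x.2.1, x.1))).map Prod.fst
        = order.map Prod.fst := by
      rw [List.map_map]
      have h2 : ((PySem.List.enumerate order 0).map Prod.snd) = order :=
        PySem.List.map_snd_enumerate order 0
      calc (PySem.List.enumerate order 0).map (Prod.fst ∘ fun x => (x.2.1, x.1))
          = ((PySem.List.enumerate order 0).map Prod.snd).map Prod.fst := by
            rw [List.map_map]; rfl
        _ = order.map Prod.fst := by rw [h2]
    rw [this]; exact hn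
  · apply List.mem_map.mpr
    refine ⟨((j : Int), order[j]), ?_, rfl⟩
    have hl : j < (PySem.List.enumerate order 0).length := by
      rw [PySem.List.length_enumerate]; exact hj
    have h3 := PySem.List.getElem_enumerate order 0 j hl
    rw [zero_add] at h3
    rw [← h3]
    exact List.getElem_mem hl

lemma pv_sorted2_eq_sorted_lex {α : Type} [LinearOrder α] (xs : List α) (k1 : α → Int) :
    PySem.List.sorted2 xs k1 (fun x => x) false =
      PySem.List.sorted xs (fun x => toLex (k1 x, x)) false := by
  have hb : (fun a b : α => decide (k1 a < k1 b) || (!decide (k1 b < k1 a) && decide (a < b)))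
      = (fun a b : α => decide (toLex (k1 a, a) < toLex (k1 b, b))) := by
    funext a b
    by_cases h1 : k1 a < k1 b <;> by_cases h2 : k1 b < k1 a <;> by_cases h3 : a < b <;>
      simp [h1, h2, h3, Prod.Lex.lt_iff] <;> omega
  unfold PySem.List.sorted2 PySem.List.sorted
  simp only [if_neg (by decide : ¬ (false = true))]
  rw [hb]

lemma pv_sorted_eq_of_perm_of_pairwise_le {α κ : Type} [LinearOrder κ]
    (xs ys : List α) (key : α → κ) (hinj : Function.Injective key)
    (hperm : ys.Perm xs) (hpw : ys.Pairwise (fun a b => key a ≤ key b)) :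
    PySem.List.sorted xs key false = ys := by
  refine List.Perm.eq_of_pairwise (le := fun a b => key a ≤ key b) ?_ ?_ hpw ?_
  · intro a b _ _ h1 h2
    exact hinj (le_antisymm h1 h2)
  · exact PySem.List.sorted_pairwise xs key
  · exact (PySem.List.sorted_perm xs key false).trans hperm.symm

lemma pv_flatMap_filter_perm {κ α : Type} [BEq κ] [LawfulBEq κ]
    (ss : List κ) (l : List α) (k : α → κ)
    (hnd : ss.Nodup) (hcov : ∀ a ∈ l, k a ∈ ss) :
    (ss.flatMap (fun s => l.filter (fun a => k a == s))).Perm l := by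
  induction ss generalizing l with
  | nil =>
      have : l = [] := by
        cases l with
        | nil => rfl
        | cons a t => exact absurd (hcov a (by simp)) (by simp)
      simp [this]
  | cons s ss ih =>
      simp only [List.nodup_cons] at hnd
      simp only [List.flatMap_cons]
      have hsub : ss.flatMap (fun t => l.filter (fun a => k a == t)) =
          ss.flatMap (fun t => (l.filter (fun a => !(k a == s))).filter (fun a => k a == t)) := by
        apply List.flatMap_congr
        intro t ht
        rw [List.filter_filter]
        apply List.filter_congr
        intro a _
        by_cases hk : k a == t
        · have : ¬ (k a == s) = true := by
            simp only [beq_iff_eq] at hk ⊢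
            rw [hk]; intro hts; exact hnd.1 (hts ▸ ht)
          simp [hk, this]
        · simp [hk]
      rw [hsub]
      have hperm' : (ss.flatMap (fun t =>
          (l.filter (fun a => !(k a == s))).filter (fun a => k a == t))).Perm
            (l.filter (fun a => !(k a == s))) := by
        apply ih _ hnd.2
        intro a ha
        have hal : a ∈ l := List.mem_of_mem_filter ha
        have hne : ¬ (k a == s) = true := by
          have := List.of_mem_filter ha; simpa using this
        rcases List.mem_cons.mp (hcov a hal) with h | h
        · exact absurd (by simp [h]) hne
        · exact h
      exact (hperm'.append_left _).trans (List.filter_append_perm _ l)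

lemma pv_pairwise_flatMap {α β : Type} {R : α → α → Prop} (l : List β) (f : β → List α)
    (hin : ∀ b ∈ l, (f b).Pairwise R)
    (hout : ∀ i j, (hi : i < l.length) → (hj : j < l.length) → i < j →
      ∀ x ∈ f l[i], ∀ y ∈ f l[j], R x y) :
    (l.flatMap f).Pairwise R := by
  induction l with
  | nil => simp
  | cons b t ih =>
      simp only [List.flatMap_cons]
      rw [List.pairwise_append]
      refine ⟨hin b (by simp), ?_, ?_⟩
      · apply ih
        · intro c hc; exact hin c (by simp [hc])
        · intro i j hi hj hij x hx y hy
          exact hout (i+1) (j+1) (by simpa using hi) (by simpa using hj) (by omega)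
            x (by simpa using hx) y (by simpa using hy)
      · intro x hx y hy
        rcases List.mem_flatMap.mp hy with ⟨c, hc, hyc⟩
        rcases List.mem_iff_getElem.mp hc with ⟨j, hj, rfl⟩
        exact hout 0 (j+1) (by simp) (by simpa using hj) (by omega)
          x (by simpa using hx) y (by simpa using hyc)

lemma pv_addA_eq (m : Int) (ps sel : List String) (h : sel.length ≤ m.toNat) :
    pvAddA m ps sel = (sel ++ ps).take m.toNat := by
  induction ps generalizing sel with
  | nil => simp [pvAddA, List.take_of_length_le h]
  | cons p ps ih =>
      rw [pvAddA]
      by_cases hlt : PySem.List.len sel < m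
      · rw [if_pos hlt, ih (sel ++ [p]) (by simp only [PySem.List.len_eq] at hlt; simp; omega)]
        simp
      · rw [if_neg hlt]
        simp only [PySem.List.len_eq] at hlt
        have he : sel.length = m.toNat := by omega
        rw [← he, List.take_left]

lemma pv_collectA_eq (m : Int) (gs : List (String × List String)) (sel : List String)
    (h : sel.length ≤ m.toNat) :
    pvCollectA m gs sel =
      (sel ++ gs.flatMap (fun sg => PySem.List.sorted sg.2 (fun x => x) false)).take m.toNat := by
  induction gs generalizing sel with
  | nil => simp [pvCollectA, List.take_of_length_le h]
  | cons sg rest ih =>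
      rw [pvCollectA]
      set g' := PySem.List.sorted sg.2 (fun x => x) false with hg'
      have hsel' : pvAddA m g' sel = (sel ++ g').take m.toNat := pv_addA_eq m g' sel h
      have hlen' : (pvAddA m g' sel).length ≤ m.toNat := by
        rw [hsel']; simp
      by_cases hge : m ≤ PySem.List.len (pvAddA m g' sel)
      · rw [if_pos hge]
        simp only [PySem.List.len_eq] at hge
        rw [hsel']
        rw [List.flatMap_cons, ← List.append_assoc]
        have hL : m.toNat ≤ (sel ++ g').length := by
          have hlen2 := congrArg List.length hsel'
          simp only [List.length_take] at hlen2
          omega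
        rw [List.take_append_of_le_length hL]
      · rw [if_neg hge]
        rw [ih _ hlen', hsel']
        rw [List.flatMap_cons, ← List.append_assoc]
        by_cases hc : m.toNat ≤ (sel ++ g').length
        · have h1 : m.toNat ≤ ((sel ++ g').take m.toNat).length := by
            rw [List.length_take]; omega
          rw [List.take_append_of_le_length hc, List.take_append_of_le_length h1,
            List.take_take, min_self]
        · have h2 : (sel ++ g').take m.toNat = sel ++ g' :=
            List.take_of_length_le (by omega)
          rw [h2]

-- the order list is a rearrangement of the dict items
lemma pv_order_perm (profiles : List String) :
    (pvSortGroups (pvGroupsB profiles)).Perm (pvGroupsB profiles).items := by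
  unfold pvSortGroups
  exact PySem.List.sorted2_perm _ _ _ false

lemma pv_order_nodup (profiles : List String) :
    ((pvSortGroups (pvGroupsB profiles)).map Prod.fst).Nodup := by
  have h := (pv_order_perm profiles).map Prod.fst
  exact h.nodup_iff.mpr (pv_nodup_keys_groupsB profiles)

-- every group of the sorted order is exactly the profiles of its series
lemma pv_group_desc (profiles : List String) (sg : String × List String)
    (hsg : sg ∈ pvSortGroups (pvGroupsB profiles)) :
    sg.2 = profiles.filter (fun p => pvSeries p == sg.1) := by
  have hmem : sg ∈ (pvGroupsB profiles).items := ((pv_order_perm profiles).mem_iff).mp hsg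
  rw [pv_items_groupsB] at hmem
  rcases List.mem_map.mp hmem with ⟨t, _, rfl⟩
  rfl

lemma pv_series_of_mem (profiles : List String) (sg : String × List String)
    (hsg : sg ∈ pvSortGroups (pvGroupsB profiles)) (p : String) (hp : p ∈ sg.2) :
    pvSeries p = sg.1 := by
  rw [pv_group_desc profiles sg hsg] at hp
  simpa using (List.of_mem_filter hp)

-- the rank key of any member of group i is i
lemma pv_k1_at (profiles : List String) (i : Nat)
    (hi : i < (pvSortGroups (pvGroupsB profiles)).length) (p : String)
    (hp : p ∈ (pvSortGroups (pvGroupsB profiles))[i].2) :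
    (pvRank (pvSortGroups (pvGroupsB profiles))).getD (pvSeries p) 0 = (i : Int) := by
  rw [pv_series_of_mem profiles _ (List.getElem_mem hi) p hp]
  exact pv_rank_getD _ (pv_order_nodup profiles) i hi

-- the central identity: B's flat sort is A's concatenation of sorted groups
lemma pv_flat_eq (profiles : List String) :
    PySem.List.sorted2 profiles
        (fun p => (pvRank (pvSortGroups (pvGroupsB profiles))).getD (pvSeries p) 0)
        (fun p => p) false =
      (pvSortGroups (pvGroupsB profiles)).flatMap
        (fun sg => PySem.List.sorted sg.2 (fun x => x) false) := by
  rw [pv_sorted2_eq_sorted_lex]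
  apply pv_sorted_eq_of_perm_of_pairwise_le
  · intro a b hab
    have h2 := congrArg (fun x : Lex (Int × String) => (ofLex x).2) hab
    simpa using h2
  · refine (List.Perm.flatMap (pv_order_perm profiles)
      (fun sg _ => PySem.List.sorted_perm sg.2 (fun x => x) false)).trans ?_
    rw [pv_items_groupsB, List.flatMap_map]
    exact pv_flatMap_filter_perm _ profiles pvSeries (PySem.Set.nodup_ofList _)
      (fun a ha => (PySem.Set.mem_ofList _ _).mpr (List.mem_map_of_mem ha))
  · apply pv_pairwise_flatMap
    · intro sg hsg
      rw [List.pairwise_iff_getElem]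
      intro i j hi hj hij
      have hxy := PySem.List.sorted_id_getElem_mono sg.2 (le_of_lt hij) hj
      have hsx := pv_series_of_mem profiles sg hsg _
        ((PySem.List.mem_sorted sg.2 (fun x => x) false _).mp (List.getElem_mem hi))
      have hsy := pv_series_of_mem profiles sg hsg _
        ((PySem.List.mem_sorted sg.2 (fun x => x) false _).mp (List.getElem_mem hj))
      rw [Prod.Lex.le_iff]
      right
      exact ⟨by simp [hsx, hsy], hxy⟩
    · intro i j hi hj hij x hx y hy
      have hx2 := (PySem.List.mem_sorted _ (fun x => x) false x).mp hx
      have hy2 := (PySem.List.mem_sorted _ (fun x => x) false y).mp hy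
      have hkx := pv_k1_at profiles i hi x hx2
      have hky := pv_k1_at profiles j hj y hy2
      rw [Prod.Lex.le_iff]
      left
      show (ofLex (toLex ((pvRank (pvSortGroups (pvGroupsB profiles))).getD (pvSeries x) 0, x))).1
        < (ofLex (toLex ((pvRank (pvSortGroups (pvGroupsB profiles))).getD (pvSeries y) 0, y))).1
      simp only [ofLex_toLex, hkx, hky]
      exact_mod_cast hij

-- ===== VERDICT (by name: the statement is the Claim_ definition above) =====
theorem group_and_limit_profiles_spec : Claim_equal_group_and_limit_profiles := by
  intro profiles m _
  unfold Spec_group_and_limit_profiles group_and_limit_profiles group_and_limit_profiles_alt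
  rw [pv_groupsA_eq_groupsB]
  rw [pv_collectA_eq m _ [] (by simp)]
  show List.take m.toNat
      ([] ++ (pvSortGroups (pvGroupsB profiles)).flatMap
        (fun sg => PySem.List.sorted sg.2 (fun x => x) false)) =
    PySem.List.slice
      (PySem.List.sorted2 profiles
        (fun p => (pvRank (pvSortGroups (pvGroupsB profiles))).getD (pvSeries p) 0)
        (fun p => p) false)
      none (some (max m 0))
  rw [pv_flat_eq]
  rw [PySem.List.slice_to _ (by omega : (0:Int) ≤ max m 0)]
  simp only [List.nil_append]
  congr 1
  omega
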